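-- pv_equiv track=rewrite | github.com/lemonpaul/matrix | utils.py | partial_h_class
-- ===== SOURCE A (Python) =====
-- def join(vector1, vector2):
--     if len(vector1) != len(vector2):
--         return None
--     return [e1 | e2 for e1, e2 in zip(vector1, vector2)]
--
-- def transpose(matrix):
--     width = len(matrix[0])
--
--     transpose_matrix = [[]] * width
--     for i in range(width):
--         transpose_matrix[i] = [vector[i] for vector in matrix]
--
--     return transpose_matrix
--
-- def space(matrix):
--     space = set([tuple(vector) for vector in matrix])
--
--     n = len(matrix)
--     m = len(matrix[0])
--
--     for i in range(n):
--         for j in range(i+1, n):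
--             space.add(tuple(join(matrix[i], matrix[j])))
--
--     space.add((0,) * m)
--
--     return space
--
-- def column_space(matrix):
--     transpose_matrix = transpose(matrix)
--     return space(transpose_matrix)
--
-- def row_space(matrix):
--     return space(matrix)
--
-- def h_equivalent(matrix1, matrix2):
--     return row_space(matrix1) == row_space(matrix2) and \
--         column_space(matrix1) == column_space(matrix2)
--
-- def partial_h_class(matrices):
--     h_classes = []
--
--     for matrix in matrices:
--         for h_class in h_classes:
--             class_matrix = h_class[0]
--             if h_equivalent(matrix, class_matrix):
--                 h_class.append(matrix)
--                 break
--         else: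
--             h_class = [matrix]
--             h_classes.append(h_class)
--
--     return h_classes
-- ===== SOURCE B (Python) =====
-- def _space_key(matrix):
--     vectors = [tuple(v) for v in matrix]
--     n = len(matrix)
--     for i in range(n):
--         for j in range(i + 1, n):
--             vectors.append(tuple(a | b for a, b in zip(matrix[i], matrix[j])))
--     vectors.append((0,) * len(matrix[0]))
--     return tuple(sorted(set(vectors)))
--
-- def _h_key(matrix):
--     cols = [list(col) for col in zip(*matrix)]
--     return (_space_key(matrix), _space_key(cols))
--
-- def partial_h_class(matrices):
--     groups = {}
--     for matrix in matrices:
--         key = _h_key(matrix)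
--         cls = groups.get(key)
--         if cls is None:
--             groups[key] = [matrix]
--         else:
--             cls.append(matrix)
--     return list(groups.values())
-- ===== Notes on version B (the rewrite author's own statement) =====
-- stated objective: faster
-- what changed: B computes one canonical key per matrix (sorted row-space point set, sorted column-space point set) and groups matrices through an insertion-ordered dict, instead of A's rescan of all class representatives with a fresh row/column-space computation for every comparison.
-- outside the precondition, e.g. on partial_h_class([[[2], [], [0, 1, 0]]]): A returns [[[[2], [], [0, 1, 0]]]], B raises IndexError; on partial_h_class([[[]], [[1]]]): A returns [[[[]]], [[[1]]]], B raises IndexError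
import Mathlib
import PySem

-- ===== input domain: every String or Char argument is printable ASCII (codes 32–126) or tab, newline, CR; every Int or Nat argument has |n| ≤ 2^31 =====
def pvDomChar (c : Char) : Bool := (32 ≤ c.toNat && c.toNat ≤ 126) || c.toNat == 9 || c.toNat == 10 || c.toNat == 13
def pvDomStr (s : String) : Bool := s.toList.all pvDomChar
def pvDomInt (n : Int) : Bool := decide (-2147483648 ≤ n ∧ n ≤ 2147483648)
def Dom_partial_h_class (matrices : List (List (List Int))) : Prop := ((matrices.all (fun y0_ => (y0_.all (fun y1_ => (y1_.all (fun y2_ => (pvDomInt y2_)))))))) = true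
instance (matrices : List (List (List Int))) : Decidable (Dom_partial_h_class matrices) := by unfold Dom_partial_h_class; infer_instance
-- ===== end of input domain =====

-- B groups matrices by a canonical (sorted row-space, sorted column-space) key computed once
-- per matrix, in an insertion-ordered dict, instead of A's rescan of class representatives
-- with a fresh space computation per comparison; objective: faster.

-- ===== PORT A =====
-- join(vector1, vector2): None where lengths differ (tuple(None) then raises; excluded by Pre_)
def pyJoin (v1 v2 : List Int) : Option (List Int) :=
  if v1.length ≠ v2.length then none
  else some (List.zipWith PySem.Int.bor v1 v2)

-- transpose(matrix): matrix[0] raises IndexError on [], vector[i] raises on a short row — both excluded by Pre_;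
-- under Pre_ every index is in range, so List.getD is exact.
def pyTranspose (matrix : List (List Int)) : List (List Int) :=
  (List.range (matrix.headD []).length).map (fun i => matrix.map (fun v => v.getD i 0))

-- space(matrix)
def pySpaceFn (matrix : List (List Int)) : PySem.Set (List Int) :=
  let n : Int := (matrix.length : Int)
  let m : Nat := (matrix.headD []).length   -- matrix[0]: IndexError on []; excluded by Pre_
  let s := (PySem.List.pyRange 0 n).foldl (fun s i =>
    (PySem.List.pyRange (i+1) n).foldl (fun s j =>
      match pyJoin (PySem.List.pyGetD matrix i []) (PySem.List.pyGetD matrix j []) with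
      | some v => PySem.Set.add s v
      | none => s    -- Python raises TypeError here (tuple(None)); unreachable under Pre_
    ) s) (PySem.Set.ofList matrix)
  PySem.Set.add s (List.replicate m 0)

def pyRowSpace (matrix : List (List Int)) : PySem.Set (List Int) := pySpaceFn matrix

def pyColumnSpace (matrix : List (List Int)) : PySem.Set (List Int) := pySpaceFn (pyTranspose matrix)

def pyHEquivalent (m1 m2 : List (List Int)) : Bool :=
  PySem.Set.equal (pyRowSpace m1) (pyRowSpace m2) &&
  PySem.Set.equal (pyColumnSpace m1) (pyColumnSpace m2)

-- the inner 'for h_class in h_classes: … break / else: append' of partial_h_class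
-- (h_class[0] on a class: classes are nonempty by construction, so headD is exact)
def pyInsertHClass (m : List (List Int)) : List (List (List (List Int))) → List (List (List (List Int)))
  | [] => [[m]]
  | c :: rest =>
    if pyHEquivalent m (c.headD []) then (c ++ [m]) :: rest
    else c :: pyInsertHClass m rest

def partial_h_class (matrices : List (List (List Int))) : List (List (List (List Int))) :=
  matrices.foldl (fun hClasses m => pyInsertHClass m hClasses) []

-- ===== PORT B =====
-- _space_key(matrix): the same point set, canonicalised by sorted(set(...))
def altSpaceKey (matrix : List (List Int)) : List (List Int) :=
  let n : Int := (matrix.length : Int)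
  let vectors := (PySem.List.pyRange 0 n).foldl (fun vs i =>
    (PySem.List.pyRange (i+1) n).foldl (fun vs j =>
      vs ++ [List.zipWith PySem.Int.bor (PySem.List.pyGetD matrix i []) (PySem.List.pyGetD matrix j [])]) vs) matrix
  let vectors := vectors ++ [List.replicate (matrix.headD []).length 0]
  PySem.List.sorted (PySem.Set.ofList vectors) (fun x => x)

-- [list(col) for col in zip(*matrix)]: zip truncates to the shortest row, so every index is in range and getD is exact
def altZipT (matrix : List (List Int)) : List (List Int) :=
  match matrix with
  | [] => []
  | r0 :: rest =>
    let w := rest.foldl (fun w r => min w r.length) r0.length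
    (List.range w).map (fun i => matrix.map (fun r => r.getD i 0))

def altHKey (matrix : List (List Int)) : (List (List Int)) × (List (List Int)) :=
  (altSpaceKey matrix, altSpaceKey (altZipT matrix))

def altStep (groups : PySem.Dict ((List (List Int)) × (List (List Int))) (List (List (List Int))))
    (matrix : List (List Int)) : PySem.Dict ((List (List Int)) × (List (List Int))) (List (List (List Int))) :=
  match groups.get? (altHKey matrix) with
  | none => groups.insert (altHKey matrix) [matrix]
  | some cls => groups.insert (altHKey matrix) (cls ++ [matrix])   -- cls.append(matrix): overwrite keeps position

def partial_h_class_alt (matrices : List (List (List Int))) : List (List (List (List Int))) :=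
  (matrices.foldl altStep PySem.Dict.empty).values

-- ===== PRECONDITION & SPEC =====
-- With two or more matrices every matrix gets compared, so A raises on any empty or
-- non-rectangular matrix or empty rows (TypeError/IndexError in join/transpose/space); with at
-- most one matrix A returns its trivial grouping without ever inspecting the matrix, but on an
-- empty matrix or empty rows B's key computation naturally raises (IndexError), so those
-- accidental inputs are excluded too.
def Pre_partial_h_class (matrices : List (List (List Int))) : Prop :=
  (matrices.length ≤ 1 ∧ ∀ M ∈ matrices, M ≠ [] ∧ ∀ r ∈ M, r ≠ [])
  ∨ (∀ M ∈ matrices, 0 < (M.headD []).length ∧ ∀ r ∈ M, r.length = (M.headD []).length)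
instance (matrices : List (List (List Int))) : Decidable (Pre_partial_h_class matrices) := by
  unfold Pre_partial_h_class; infer_instance

def pvWitness_partial_h_class : List (List (List Int)) := [[[1, 0], [0, 1]], [[0, 1], [1, 0]], [[1, 1]]]

def Spec_partial_h_class (matrices : List (List (List Int))) (out : List (List (List (List Int)))) : Prop := out = partial_h_class_alt matrices
instance (matrices : List (List (List Int))) (out : List (List (List (List Int)))) : Decidable (Spec_partial_h_class matrices out) := by unfold Spec_partial_h_class; infer_instance

-- ===== CLAIM (what is proved, stated in full; the proofs are below) =====
def Claim_equal_partial_h_class : Prop := ∀ (matrices : List (List (List Int))), Dom_partial_h_class matrices → Pre_partial_h_class matrices → Spec_partial_h_class matrices (partial_h_class matrices)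

-- ===== LEMMAS AND PROOFS =====

-- a matrix A accepts: nonempty, nonempty rows, rectangular
def PreM (M : List (List Int)) : Prop :=
  0 < (M.headD []).length ∧ ∀ r ∈ M, r.length = (M.headD []).length

-- the list of vectors B collects before canonicalising
def altVecs (M : List (List Int)) : List (List Int) :=
  ((PySem.List.pyRange 0 (M.length : Int)).foldl (fun vs i =>
    (PySem.List.pyRange (i+1) (M.length : Int)).foldl (fun vs j =>
      vs ++ [List.zipWith PySem.Int.bor (PySem.List.pyGetD M i []) (PySem.List.pyGetD M j [])]) vs) M)
  ++ [List.replicate (M.headD []).length 0]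

lemma altSpaceKey_def (M : List (List Int)) :
    altSpaceKey M = PySem.List.sorted (PySem.Set.ofList (altVecs M)) (fun x => x) := rfl

lemma ofList_foldl_append {α : Type} [BEq α] (l : List Int) (g : Int → α) (acc : List α) :
    PySem.Set.ofList (l.foldl (fun vs j => vs ++ [g j]) acc)
      = l.foldl (fun s j => PySem.Set.add s (g j)) (PySem.Set.ofList acc) := by
  induction l generalizing acc with
  | nil => rfl
  | cons j l ih => simp only [List.foldl_cons, ih, PySem.Set.ofList_append_singleton]

lemma ofList_foldl_nested {α : Type} [BEq α] (lo : List Int) (li : Int → List Int)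
    (g : Int → Int → α) (acc : List α) :
    PySem.Set.ofList (lo.foldl (fun vs i => (li i).foldl (fun vs j => vs ++ [g i j]) vs) acc)
      = lo.foldl (fun s i => (li i).foldl (fun s j => PySem.Set.add s (g i j)) s) (PySem.Set.ofList acc) := by
  induction lo generalizing acc with
  | nil => rfl
  | cons i lo ih => simp only [List.foldl_cons, ih, ofList_foldl_append]

lemma row_len {M : List (List Int)} (hrect : ∀ r ∈ M, r.length = (M.headD []).length)
    {i : Int} (h0 : 0 ≤ i) (h1 : i < (M.length : Int)) :
    (PySem.List.pyGetD M i []).length = (M.headD []).length := by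
  rw [PySem.List.pyGetD_eq_getElem M [] h0 h1]
  exact hrect _ (List.getElem_mem _)

lemma pySpace_eq {M : List (List Int)} (hrect : ∀ r ∈ M, r.length = (M.headD []).length) :
    pySpaceFn M = PySem.Set.ofList (altVecs M) := by
  unfold pySpaceFn altVecs
  dsimp only
  rw [PySem.Set.ofList_append_singleton, ofList_foldl_nested]
  congr 1
  apply PySem.List.foldl_congr_mem
  intro s i hi
  apply PySem.List.foldl_congr_mem
  intro s' j hj
  rw [PySem.List.mem_pyRange_one] at hi hj
  have li : (PySem.List.pyGetD M i []).length = (M.headD []).length :=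
    row_len hrect hi.1 hi.2
  have lj : (PySem.List.pyGetD M j []).length = (M.headD []).length :=
    row_len hrect (by omega) hj.2
  simp [pyJoin, li, lj]

lemma transpose_eq {M : List (List Int)} (hM : PreM M) : pyTranspose M = altZipT M := by
  obtain ⟨hpos, hrect⟩ := hM
  match M with
  | [] => simp at hpos
  | r0 :: rest =>
    have hw : rest.foldl (fun w r => min w r.length) r0.length = r0.length := by
      have : ∀ r ∈ rest, r.length = r0.length := fun r hr => hrect r (List.mem_cons_of_mem _ hr)
      clear hrect hpos
      induction rest with
      | nil => rfl
      | cons r rest ih =>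
        have hr : r.length = r0.length := this r (List.mem_cons_self ..)
        simp only [List.foldl_cons, hr, min_self]
        exact ih (fun r hr => this r (List.mem_cons_of_mem _ hr))
    simp [pyTranspose, altZipT, hw]

lemma preM_transpose {M : List (List Int)} (hM : PreM M) : PreM (pyTranspose M) := by
  obtain ⟨hpos, hrect⟩ := hM
  have hMne : M ≠ [] := by
    intro h; subst h; simp at hpos
  unfold pyTranspose
  obtain ⟨L, hL⟩ : ∃ L, (M.headD []).length = L + 1 :=
    ⟨(M.headD []).length - 1, by omega⟩
  rw [hL, List.range_succ_eq_map]
  constructor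
  · simp [List.length_pos_iff, hMne]
  · intro r hr
    simp only [List.map_cons, List.mem_cons, List.mem_map] at hr
    rcases hr with h | ⟨i, _, h⟩ <;> subst h <;> simp

lemma sorted_inst (s : List (List Int)) :
    PySem.List.sorted s (fun x => x)
      = @PySem.List.sorted (List Int) (List Int) List.instLinearOrder.toLT
          LinearOrder.toDecidableLT s (fun x => x) false := by
  congr 1

lemma equal_eq_decide {s t : PySem.Set (List Int)} (hs : s.Nodup) (ht : t.Nodup) :
    PySem.Set.equal s t
      = decide (PySem.List.sorted s (fun x => x) = PySem.List.sorted t (fun x => x)) := by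
  rw [Bool.eq_iff_iff]
  rw [PySem.Set.equal_iff, decide_eq_true_iff, sorted_inst s, sorted_inst t]
  exact ((List.perm_ext_iff_of_nodup hs ht).symm).trans
    (PySem.List.sorted_id_eq_sorted_id_iff_perm s t).symm

lemma nodup_pySpace {M : List (List Int)} (hrect : ∀ r ∈ M, r.length = (M.headD []).length) :
    (pySpaceFn M).Nodup := by
  rw [pySpace_eq hrect]; exact PySem.Set.nodup_ofList _

lemma hEquiv_eq {M1 M2 : List (List Int)} (h1 : PreM M1) (h2 : PreM M2) :
    pyHEquivalent M1 M2 = (altHKey M1 == altHKey M2) := by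
  have hR1 : altSpaceKey M1 = PySem.List.sorted (pySpaceFn M1) (fun x => x) := by
    rw [altSpaceKey_def, ← pySpace_eq h1.2]
  have hR2 : altSpaceKey M2 = PySem.List.sorted (pySpaceFn M2) (fun x => x) := by
    rw [altSpaceKey_def, ← pySpace_eq h2.2]
  have hC1 : altSpaceKey (altZipT M1) = PySem.List.sorted (pySpaceFn (pyTranspose M1)) (fun x => x) := by
    rw [← transpose_eq h1, altSpaceKey_def, ← pySpace_eq (preM_transpose h1).2]
  have hC2 : altSpaceKey (altZipT M2) = PySem.List.sorted (pySpaceFn (pyTranspose M2)) (fun x => x) := by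
    rw [← transpose_eq h2, altSpaceKey_def, ← pySpace_eq (preM_transpose h2).2]
  rw [Bool.eq_iff_iff]
  unfold pyHEquivalent pyRowSpace pyColumnSpace altHKey
  rw [hR1, hR2, hC1, hC2, Bool.and_eq_true, beq_iff_eq, Prod.mk.injEq,
    equal_eq_decide (nodup_pySpace h1.2) (nodup_pySpace h2.2),
    equal_eq_decide (nodup_pySpace (preM_transpose h1).2) (nodup_pySpace (preM_transpose h2).2)]
  simp only [decide_eq_true_eq]

-- the key B stores for a class: the key of its first matrix
def kf (c : List (List (List Int))) : (List (List Int)) × (List (List Int)) := altHKey (c.headD [])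

lemma kf_append {c : List (List (List Int))} (hc : c ≠ []) (m : List (List Int)) :
    kf (c ++ [m]) = kf c := by
  cases c with
  | nil => exact absurd rfl hc
  | cons x xs => rfl

lemma altStep_cons {pk : (List (List Int)) × (List (List Int))} {pv : List (List (List Int))}
    {t : List (((List (List Int)) × (List (List Int))) × List (List (List Int)))}
    {m : List (List Int)} (hne : (pk == altHKey m) = false) :
    altStep (PySem.Dict.mk ((pk, pv) :: t)) m
      = PySem.Dict.mk ((pk, pv) :: (altStep (PySem.Dict.mk t) m).items) := by
  have hne' : pk ≠ altHKey m := by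
    intro h; rw [h] at hne; simp at hne
  unfold altStep
  rw [PySem.Dict.get?_mk_cons]
  simp only [hne, Bool.false_eq_true, if_false]
  have hcont : ∀ v, (PySem.Dict.mk ((pk, pv) :: t)).contains v = ((pk == v) || (PySem.Dict.mk t).contains v) := by
    intro v; simp [PySem.Dict.contains]
  cases hg : (PySem.Dict.mk t).get? (altHKey m) with
  | none =>
    simp only [PySem.Dict.insert, hcont, hne, Bool.false_or]
    cases h : (PySem.Dict.mk t).contains (altHKey m) with
    | true => simp [hne']
    | false => simp
  | some cls =>
    simp only [PySem.Dict.insert, hcont, hne, Bool.false_or]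
    cases h : (PySem.Dict.mk t).contains (altHKey m) with
    | true => simp [hne']
    | false => simp

lemma kf_insert_sub (m : List (List Int)) (classes : List (List (List (List Int))))
    (hcls : ∀ c ∈ classes, c ≠ []) :
    ∀ x ∈ (pyInsertHClass m classes).map kf, x ∈ classes.map kf ∨ x = altHKey m := by
  induction classes with
  | nil => simp [pyInsertHClass, kf]
  | cons c rest ih =>
    intro x hx
    simp only [pyInsertHClass] at hx
    split at hx
    · simp only [List.map_cons, List.mem_cons] at hx ⊢
      rcases hx with h | h
      · left; left
        rw [h, kf_append (hcls c (List.mem_cons_self ..))]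
      · left; right; exact h
    · simp only [List.map_cons, List.mem_cons] at hx ⊢
      rcases hx with h | h
      · left; left; exact h
      · rcases ih (fun c hc => hcls c (List.mem_cons_of_mem _ hc)) x h with h' | h'
        · left; right; exact h'
        · right; exact h'

lemma step_eq (m : List (List Int)) (hm : PreM m) :
    ∀ (classes : List (List (List (List Int)))),
    (∀ c ∈ classes, c ≠ [] ∧ PreM (c.headD [])) → (classes.map kf).Nodup →
    altStep (PySem.Dict.mk (classes.map (fun c => (kf c, c)))) m
        = PySem.Dict.mk ((pyInsertHClass m classes).map (fun c => (kf c, c)))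
      ∧ (∀ c ∈ pyInsertHClass m classes, c ≠ [] ∧ PreM (c.headD []))
      ∧ ((pyInsertHClass m classes).map kf).Nodup := by
  intro classes
  induction classes with
  | nil =>
    intro _ _
    refine ⟨?_, ?_, ?_⟩
    · simp [altStep, PySem.Dict.get?, PySem.Dict.insert, PySem.Dict.contains, pyInsertHClass, kf]
    · intro c hc
      simp only [pyInsertHClass, List.mem_cons, List.not_mem_nil, or_false] at hc
      subst hc
      exact ⟨by simp, by simpa [PreM] using hm⟩
    · simp [pyInsertHClass]
  | cons c rest ih =>
    intro hcls hnd
    have hc := hcls c (List.mem_cons_self ..)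
    have hrest : ∀ c' ∈ rest, c' ≠ [] ∧ PreM (c'.headD []) :=
      fun c' hc' => hcls c' (List.mem_cons_of_mem _ hc')
    have hndr : (rest.map kf).Nodup := (List.nodup_cons.mp hnd).2
    have hguard : pyHEquivalent m (c.headD []) = (altHKey m == kf c) := hEquiv_eq hm hc.2
    cases hg : pyHEquivalent m (c.headD []) with
    | true =>
      have hk : altHKey m = kf c := by
        rw [hg] at hguard; exact (beq_iff_eq.mp hguard.symm)
      have hins : pyInsertHClass m (c :: rest) = (c ++ [m]) :: rest := by
        simp only [pyInsertHClass, hg, reduceIte]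
      refine ⟨?_, ?_, ?_⟩
      · rw [hins]
        have hget : (PySem.Dict.mk ((c :: rest).map (fun c => (kf c, c)))).get? (altHKey m) = some c := by
          simp [PySem.Dict.get?, hk]
        simp only [altStep, hget]
        have hcont : (PySem.Dict.mk ((c :: rest).map (fun c => (kf c, c)))).contains (altHKey m) = true := by
          simp [PySem.Dict.contains, hk]
        apply PySem.Dict.ext
        rw [PySem.Dict.items_insert_of_contains _ _ hcont]
        simp only [List.map_cons, List.map_map, hk]
        congr 1
        · simp [kf_append hc.1]
        · apply List.map_congr_left
          intro c' hc'
          have hne2 : kf c' ≠ kf c := by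
            intro h
            exact (List.nodup_cons.mp hnd).1 (h ▸ List.mem_map_of_mem hc')
          simp [Function.comp, hne2]
      · rw [hins]
        intro c' hc'
        rcases List.mem_cons.mp hc' with h | h
        · subst h
          refine ⟨by simp, ?_⟩
          cases c with
          | nil => exact absurd rfl hc.1
          | cons x xs => simpa using hc.2
        · exact hrest c' h
      · rw [hins]
        simp only [List.map_cons, List.nodup_cons, kf_append hc.1]
        exact ⟨(List.nodup_cons.mp hnd).1, hndr⟩
    | false =>
      have hkne : (kf c == altHKey m) = false := by
        rw [hg] at hguard
        rcases h : (kf c == altHKey m) with _ | _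
        · rfl
        · exfalso
          have hbe : (altHKey m == kf c) = true := beq_iff_eq.mpr ((beq_iff_eq.mp h).symm)
          rw [← hguard] at hbe
          exact Bool.false_ne_true hbe
      have hins : pyInsertHClass m (c :: rest) = c :: pyInsertHClass m rest := by
        simp only [pyInsertHClass, hg, Bool.false_eq_true, reduceIte]
      obtain ⟨ihe, ihp, ihn⟩ := ih hrest hndr
      refine ⟨?_, ?_, ?_⟩
      · rw [hins]
        simp only [List.map_cons]
        rw [altStep_cons (pk := kf c) (pv := c) hkne, ihe]
      · rw [hins]
        intro c' hc'
        rcases List.mem_cons.mp hc' with h | h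
        · subst h; exact hc
        · exact ihp c' h
      · rw [hins]
        simp only [List.map_cons, List.nodup_cons]
        refine ⟨?_, ihn⟩
        intro hmem
        rcases kf_insert_sub m rest (fun c' h => (hrest c' h).1) _ hmem with h | h
        · exact (List.nodup_cons.mp hnd).1 h
        · rw [h] at hmem
          exact absurd (beq_iff_eq.mpr h) (by simp [hkne])

lemma fold_eq (matrices : List (List (List Int))) (hpre : ∀ M ∈ matrices, PreM M) :
    ∀ (classes : List (List (List (List Int)))),
    (∀ c ∈ classes, c ≠ [] ∧ PreM (c.headD [])) → (classes.map kf).Nodup →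
    matrices.foldl altStep (PySem.Dict.mk (classes.map (fun c => (kf c, c))))
      = PySem.Dict.mk ((matrices.foldl (fun hClasses m => pyInsertHClass m hClasses) classes).map
          (fun c => (kf c, c))) := by
  induction matrices with
  | nil => intro classes _ _; rfl
  | cons m rest ih =>
    intro classes hcls hnd
    have hm : PreM m := hpre m (List.mem_cons_self ..)
    obtain ⟨he, hp, hn⟩ := step_eq m hm classes hcls hnd
    simp only [List.foldl_cons, he]
    exact ih (fun M hM => hpre M (List.mem_cons_of_mem _ hM)) _ hp hn

-- ===== VERDICT (by name: the statement is the Claim_ definition above) =====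
theorem partial_h_class_spec : Claim_equal_partial_h_class := by
  intro matrices _ hpre
  unfold Spec_partial_h_class
  rcases hpre with ⟨hlen, _⟩ | hpre
  · match matrices, hlen with
    | [], _ => rfl
    | [m], _ => rfl
  · unfold partial_h_class partial_h_class_alt
    have hpre' : ∀ M ∈ matrices, PreM M := hpre
    have h := fold_eq matrices hpre' [] (by simp) (by simp)
    have hempty : (PySem.Dict.empty : PySem.Dict ((List (List Int)) × (List (List Int))) (List (List (List Int)))) = PySem.Dict.mk [] := rfl
    rw [hempty]
    simp only [List.map_nil] at h
    rw [h]
    simp [PySem.Dict.values, List.map_map, Function.comp_def]
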